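-- pv_equiv track=rewrite | github.com/D-Chase-H/Deep_Keyword_Searcher | deep_keyword_searcher_gui.py | get_zipped_path
-- ===== SOURCE A (Python) =====
-- def get_zipped_path(path):
--
--     path = list(path)
--
--     while True:
--         if ''.join(path[-3:]) == ".7z":
--             break
--         elif ''.join(path[-4:]) == ".zip":
--             break
--         elif ''.join(path[-4:]) == ".rar":
--             break
--         elif ''.join(path[-4:]) == ".tar":
--             break
--         elif ''.join(path[-7:]) == ".tar.gz":
--             break
--
--         path.pop()
--
--     return ''.join(path)
-- ===== SOURCE B (Python) =====
-- ARCHIVE_EXTS = (".7z", ".zip", ".rar", ".tar", ".tar.gz")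
--
--
-- def get_zipped_path(path):
--     cuts = [path.rfind(ext) + len(ext) for ext in ARCHIVE_EXTS if ext in path]
--     if not cuts:
--         return path
--     return path[:max(cuts)]
-- ===== Notes on version B (the rewrite author's own statement) =====
-- stated objective: alternative
-- what changed: Instead of popping characters one at a time until the list ends in an archive extension, B does one rfind per extension and slices the path at the maximal match end.
import Mathlib
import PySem

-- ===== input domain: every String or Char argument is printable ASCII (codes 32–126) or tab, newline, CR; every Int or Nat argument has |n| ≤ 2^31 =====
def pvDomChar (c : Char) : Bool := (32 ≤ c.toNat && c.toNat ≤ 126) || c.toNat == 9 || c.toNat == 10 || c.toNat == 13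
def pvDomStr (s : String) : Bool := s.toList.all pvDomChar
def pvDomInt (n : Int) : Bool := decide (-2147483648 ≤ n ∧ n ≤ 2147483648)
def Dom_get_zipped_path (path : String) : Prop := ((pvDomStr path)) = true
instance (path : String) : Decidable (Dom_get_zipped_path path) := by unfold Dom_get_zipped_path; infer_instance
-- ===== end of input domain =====

-- B replaces A's pop-one-character-at-a-time loop by one rfind per archive extension and a single
-- slice at the maximal match end; where A raises IndexError (no extension present) B returns the path unchanged.


-- ===== PORT A =====
-- the while-loop of A: checks the five suffix tests in order, else pops the last character;
-- `none` is Python's IndexError from `path.pop()` on the empty list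
def pvLoopA (l : List Char) : Option (List Char) :=
  if PySem.List.slice l (some (-3)) none = ['.', '7', 'z'] then some l
  else if PySem.List.slice l (some (-4)) none = ['.', 'z', 'i', 'p'] then some l
  else if PySem.List.slice l (some (-4)) none = ['.', 'r', 'a', 'r'] then some l
  else if PySem.List.slice l (some (-4)) none = ['.', 't', 'a', 'r'] then some l
  else if PySem.List.slice l (some (-7)) none = ['.', 't', 'a', 'r', '.', 'g', 'z'] then some l
  else if _h : l = [] then none
  else pvLoopA l.dropLast
termination_by l.length
decreasing_by
  have : l.length ≠ 0 := fun h => _h (List.eq_nil_of_length_eq_zero h)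
  simp [List.length_dropLast]; omega

def get_zipped_path (path : String) : String :=
  match pvLoopA path.toList with
  | some l => String.ofList l           -- ''.join(path)
  | none => ""                          -- unreachable under Pre_ (IndexError)

-- ===== PORT B =====
def pvArchiveExts : List String := [".7z", ".zip", ".rar", ".tar", ".tar.gz"]

def get_zipped_path_alt (path : String) : String :=
  let cuts := (pvArchiveExts.filter (fun e => PySem.Str.isIn e path)).map
      (fun e => PySem.Str.rfind path e + PySem.Str.len e)
  match cuts.max? with
  | none => path
  | some m => PySem.Str.slice path none (some m)

-- ===== PRECONDITION & SPEC =====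
-- Pre_ excludes exactly the paths containing none of the five archive extensions: there A pops from
-- an empty list and raises IndexError.
def Pre_get_zipped_path (path : String) : Prop :=
  (PySem.Str.isIn ".7z" path || PySem.Str.isIn ".zip" path || PySem.Str.isIn ".rar" path ||
   PySem.Str.isIn ".tar" path || PySem.Str.isIn ".tar.gz" path) = true
instance (path : String) : Decidable (Pre_get_zipped_path path) := by
  unfold Pre_get_zipped_path; infer_instance

def pvWitness_get_zipped_path : String := "a.zip"

def Spec_get_zipped_path (path : String) (out : String) : Prop := out = get_zipped_path_alt path
instance (path : String) (out : String) : Decidable (Spec_get_zipped_path path out) := by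
  unfold Spec_get_zipped_path; infer_instance

-- ===== CLAIM (what is proved, stated in full; the proofs are below) =====
def Claim_equal_get_zipped_path : Prop := ∀ (path : String), Dom_get_zipped_path path →
  Pre_get_zipped_path path → Spec_get_zipped_path path (get_zipped_path path)

-- ===== LEMMAS AND PROOFS =====

-- the five extensions, as character lists
def pvExtsL : List (List Char) :=
  [['.', '7', 'z'], ['.', 'z', 'i', 'p'], ['.', 'r', 'a', 'r'], ['.', 't', 'a', 'r'],
   ['.', 't', 'a', 'r', '.', 'g', 'z']]

-- "the current list ends in one of the extensions"
def pvGood (l : List Char) : Prop := ∃ e ∈ pvExtsL, e <:+ l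

-- the cut candidates of B, on the character-list side
def pvCuts (s : List Char) : List Int :=
  (pvExtsL.filter (fun e => PySem.Chars.isIn e s)).map
    (fun e => PySem.Chars.rfind s e + (e.length : Int))

lemma pv_slice_suffix_iff (l e : List Char) (k : Nat) (hk : 1 < k) (he : e.length = k) :
    PySem.List.slice l (some (-(k : Int))) none = e ↔ e <:+ l := by
  have hs : PySem.List.slice l (some (-(k : Int))) none = l.drop (l.length - k) := by
    exact_mod_cast PySem.List.slice_from_neg_ofNat l k hk
  rw [hs, List.suffix_iff_eq_drop, he, eq_comm]

lemma pv_chain_iff (l : List Char) :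
    (PySem.List.slice l (some (-3)) none = ['.', '7', 'z'] ∨
     PySem.List.slice l (some (-4)) none = ['.', 'z', 'i', 'p'] ∨
     PySem.List.slice l (some (-4)) none = ['.', 'r', 'a', 'r'] ∨
     PySem.List.slice l (some (-4)) none = ['.', 't', 'a', 'r'] ∨
     PySem.List.slice l (some (-7)) none = ['.', 't', 'a', 'r', '.', 'g', 'z']) ↔ pvGood l := by
  have e1 := pv_slice_suffix_iff l ['.', '7', 'z'] 3 (by omega) rfl
  have e2 := pv_slice_suffix_iff l ['.', 'z', 'i', 'p'] 4 (by omega) rfl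
  have e3 := pv_slice_suffix_iff l ['.', 'r', 'a', 'r'] 4 (by omega) rfl
  have e4 := pv_slice_suffix_iff l ['.', 't', 'a', 'r'] 4 (by omega) rfl
  have e5 := pv_slice_suffix_iff l ['.', 't', 'a', 'r', '.', 'g', 'z'] 7 (by omega) rfl
  simp only [Nat.cast_ofNat] at e1 e2 e3 e4 e5
  rw [e1, e2, e3, e4, e5]
  simp [pvGood, pvExtsL]

lemma pv_loopA_good (l : List Char) (h : pvGood l) : pvLoopA l = some l := by
  rw [pvLoopA]
  rw [← pv_chain_iff] at h
  rcases h with h | h | h | h | h <;> simp [h]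

lemma pv_loopA_not_good (l : List Char) (h : ¬ pvGood l) (hne : l ≠ []) :
    pvLoopA l = pvLoopA l.dropLast := by
  rw [pvLoopA]
  rw [← pv_chain_iff] at h
  push Not at h
  obtain ⟨h1, h2, h3, h4, h5⟩ := h
  simp [h1, h2, h3, h4, h5, hne]

-- rfind.go finds the largest j ≤ k at which sub is a prefix of s.drop j, else -1
lemma pv_go_spec (s e : List Char) (k : Nat) :
    (PySem.Chars.rfind.go s e k = -1 ∧ ∀ j ≤ k, ¬ e <+: s.drop j) ∨
    (∃ j : Nat, PySem.Chars.rfind.go s e k = (j : Int) ∧ j ≤ k ∧ e <+: s.drop j ∧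
      ∀ j' ≤ k, e <+: s.drop j' → j' ≤ j) := by
  induction k with
  | zero =>
    by_cases hp : e <+: s
    · exact Or.inr ⟨0, by simp [PySem.Chars.rfind.go, List.isPrefixOf_iff_prefix, hp],
        le_refl 0, by simpa using hp, fun j' hj' _ => hj'⟩
    · refine Or.inl ⟨by simp [PySem.Chars.rfind.go, List.isPrefixOf_iff_prefix, hp], ?_⟩
      intro j hj
      interval_cases j
      simpa using hp
  | succ k ih =>
    have gs : PySem.Chars.rfind.go s e (k + 1) =
        if e.isPrefixOf (s.drop (k + 1)) then ((k + 1 : Nat) : Int)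
        else PySem.Chars.rfind.go s e k := by
      simp [PySem.Chars.rfind.go]
    by_cases hp : e <+: s.drop (k + 1)
    · refine Or.inr ⟨k + 1, ?_, le_refl _, hp, fun j' hj' _ => hj'⟩
      rw [gs, if_pos (List.isPrefixOf_iff_prefix.mpr hp)]
    · rw [gs, if_neg (by simpa [List.isPrefixOf_iff_prefix] using hp)]
      rcases ih with ⟨hv, hall⟩ | ⟨j, hv, hjk, hpre, hmax⟩
      · refine Or.inl ⟨hv, fun j hj => ?_⟩
        rcases Nat.lt_or_ge j (k + 1) with h' | h'
        · exact hall j (by omega)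
        · have : j = k + 1 := by omega
          subst this; exact hp
      · refine Or.inr ⟨j, hv, by omega, hpre, fun j' hj' hp' => ?_⟩
        rcases Nat.lt_or_ge j' (k + 1) with h' | h'
        · exact hmax j' (by omega) hp'
        · exfalso; have : j' = k + 1 := by omega
          subst this; exact hp hp'

-- rfind points at the last occurrence: if e occurs as a prefix of some s.drop j, rfind returns the
-- largest such index
lemma pv_rfind_pos (s e : List Char) (he : e ≠ []) (j : Nat) (hj : e <+: s.drop j) :
    ∃ j0 : Nat, PySem.Chars.rfind s e = (j0 : Int) ∧ j ≤ j0 ∧ e <+: s.drop j0 ∧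
      j0 + e.length ≤ s.length := by
  have hjle : j ≤ s.length := by
    by_contra hgt
    have hd : s.drop j = [] := List.drop_eq_nil_of_le (by omega)
    rw [hd] at hj
    exact he (List.prefix_nil.mp hj)
  have hr : PySem.Chars.rfind s e = PySem.Chars.rfind.go s e s.length := rfl
  rcases pv_go_spec s e s.length with ⟨_, hall⟩ | ⟨j0, hv, hj0k, hpre, hmax⟩
  · exact absurd hj (hall j hjle)
  · have hplen := hpre.length_le
    rw [List.length_drop] at hplen
    exact ⟨j0, by rw [hr, hv], hmax j hjle hj, hpre, by omega⟩

lemma pv_suffix_take_iff (e s : List Char) (k : Nat) (hk : k ≤ s.length) (hke : e.length ≤ k) :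
    e <:+ s.take k ↔ e <+: s.drop (k - e.length) := by
  constructor
  · rintro ⟨t, ht⟩
    have hlen : t.length + e.length = k := by
      have := congrArg List.length ht
      simp [List.length_take] at this
      omega
    have hds : s.drop (k - e.length) = e ++ s.drop k := by
      have hdt : k - e.length = t.length := by omega
      rw [hdt]
      conv_lhs => rw [← List.take_append_drop k s, ← ht, List.append_assoc]
      exact List.drop_left
    rw [hds]
    exact ⟨s.drop k, rfl⟩
  · rintro ⟨r, hr⟩
    have hts : s.take k = s.take (k - e.length) ++ e := by
      have hk2 : s.take k = s.take ((k - e.length) + e.length) := by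
        congr 1; omega
      rw [hk2, List.take_add, ← hr, List.take_left]
    exact ⟨s.take (k - e.length), hts.symm⟩

lemma pv_max_spec (s : List Char) (m : Int) (h : (pvCuts s).max? = some m) :
    0 ≤ m ∧ m.toNat ≤ s.length ∧ pvGood (s.take m.toNat) ∧
      ∀ k : Nat, k ≤ s.length → pvGood (s.take k) → (k : Int) ≤ m := by
  obtain ⟨hmem, hle⟩ := List.max?_eq_some_iff.mp h
  rw [pvCuts, List.mem_map] at hmem
  obtain ⟨e, hef, hev⟩ := hmem
  rw [List.mem_filter] at hef
  obtain ⟨heE, hein⟩ := hef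
  have hene : e ≠ [] := by rintro rfl; exact absurd heE (by decide)
  obtain ⟨j, hj⟩ := (PySem.Chars.exists_prefix_drop_iff_isIn e s).mpr hein
  obtain ⟨j0, hj0v, _, hj0p, hj0len⟩ := pv_rfind_pos s e hene j hj
  have hm : m = (j0 : Int) + (e.length : Int) := by rw [← hev, hj0v]
  have hm0 : 0 ≤ m := by omega
  have hmn : m.toNat = j0 + e.length := by omega
  refine ⟨hm0, by omega, ?_, ?_⟩
  · refine ⟨e, heE, ?_⟩
    rw [pv_suffix_take_iff e s m.toNat (by omega) (by omega)]
    have : m.toNat - e.length = j0 := by omega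
    rw [this]; exact hj0p
  · intro k hk hg
    obtain ⟨e', he'E, hsuf⟩ := hg
    have he'ne : e' ≠ [] := by rintro rfl; exact absurd he'E (by decide)
    have hlt : e'.length ≤ k := by
      have h1 := hsuf.length_le
      rwa [List.length_take, Nat.min_eq_left hk] at h1
    rw [pv_suffix_take_iff e' s k hk hlt] at hsuf
    obtain ⟨j1, hj1v, hj1ge, _, _⟩ := pv_rfind_pos s e' he'ne (k - e'.length) hsuf
    have hcut : PySem.Chars.rfind s e' + (e'.length : Int) ∈ pvCuts s := by
      rw [pvCuts, List.mem_map]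
      refine ⟨e', List.mem_filter.mpr ⟨he'E, ?_⟩, rfl⟩
      exact (PySem.Chars.exists_prefix_drop_iff_isIn e' s).mp ⟨k - e'.length, hsuf⟩
    have := hle _ hcut
    rw [hj1v] at this
    omega

lemma pv_loop_spec (n : Nat) (s : List Char) (hn : n ≤ s.length) (K : Nat) (hK : K ≤ n)
    (hgood : pvGood (s.take K)) (hmax : ∀ k, K < k → k ≤ n → ¬ pvGood (s.take k)) :
    pvLoopA (s.take n) = some (s.take K) := by
  revert hn hK hmax
  induction n with
  | zero =>
    intro hn hK hmax
    have : K = 0 := by omega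
    subst this
    exact pv_loopA_good _ hgood
  | succ n ih =>
    intro hn hK hmax
    by_cases hKn : K = n + 1
    · subst hKn
      exact pv_loopA_good _ hgood
    · have hng : ¬ pvGood (s.take (n + 1)) := hmax (n + 1) (by omega) (le_refl _)
      have hne : s.take (n + 1) ≠ [] := by
        have hlt : (s.take (n + 1)).length = n + 1 := by
          rw [List.length_take]; omega
        intro hnil
        rw [hnil] at hlt
        simp at hlt
      rw [pv_loopA_not_good _ hng hne]
      have hdl : (s.take (n + 1)).dropLast = s.take n := by
        rw [List.dropLast_eq_take, List.length_take, List.take_take]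
        congr 1
        omega
      rw [hdl]
      exact ih (by omega) (by omega) (fun k h1 h2 => hmax k h1 (by omega))

-- ===== VERDICT (by name: the statement is the Claim_ definition above) =====
theorem get_zipped_path_spec : Claim_equal_get_zipped_path := by
  intro path _ hpre
  unfold Spec_get_zipped_path
  have t1 : ".7z".toList = ['.', '7', 'z'] := by decide
  have t2 : ".zip".toList = ['.', 'z', 'i', 'p'] := by decide
  have t3 : ".rar".toList = ['.', 'r', 'a', 'r'] := by decide
  have t4 : ".tar".toList = ['.', 't', 'a', 'r'] := by decide
  have t5 : ".tar.gz".toList = ['.', 't', 'a', 'r', '.', 'g', 'z'] := by decide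
  have hc : (pvArchiveExts.filter (fun e => PySem.Str.isIn e path)).map
      (fun e => PySem.Str.rfind path e + PySem.Str.len e) = pvCuts path.toList := by
    have l1 : (".7z" : String).length = 3 := by decide
    have l2 : (".zip" : String).length = 4 := by decide
    have l3 : (".rar" : String).length = 4 := by decide
    have l4 : (".tar" : String).length = 4 := by decide
    have l5 : (".tar.gz" : String).length = 7 := by decide
    simp only [pvArchiveExts, pvCuts, pvExtsL, List.filter_cons, List.filter_nil,
      PySem.Str.isIn_eq, t1, t2, t3, t4, t5]
    split_ifs <;>
      simp [PySem.Str.rfind_eq, PySem.Str.len_eq, t1, t2, t3, t4, t5, l1, l2, l3, l4, l5]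
  have hex : ∃ e ∈ pvExtsL, PySem.Chars.isIn e path.toList = true := by
    unfold Pre_get_zipped_path at hpre
    simp only [Bool.or_eq_true, PySem.Str.isIn_eq, t1, t2, t3, t4, t5] at hpre
    rcases hpre with ((((h | h) | h) | h) | h)
    · exact ⟨_, by decide, h⟩
    · exact ⟨_, by decide, h⟩
    · exact ⟨_, by decide, h⟩
    · exact ⟨_, by decide, h⟩
    · exact ⟨_, by decide, h⟩
  obtain ⟨e, heE, hein⟩ := hex
  have hne : pvCuts path.toList ≠ [] := by
    apply List.ne_nil_of_mem (a := PySem.Chars.rfind path.toList e + (e.length : Int))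
    rw [pvCuts, List.mem_map]
    exact ⟨e, List.mem_filter.mpr ⟨heE, hein⟩, rfl⟩
  obtain ⟨m, hm⟩ : ∃ m, (pvCuts path.toList).max? = some m := by
    cases h : (pvCuts path.toList).max? with
    | none => exact absurd (List.max?_eq_none_iff.mp h) hne
    | some m => exact ⟨m, rfl⟩
  obtain ⟨hm0, hmlen, hmgood, hmmax⟩ := pv_max_spec _ _ hm
  have hloop : pvLoopA path.toList = some (path.toList.take m.toNat) := by
    have hmx : ∀ k, m.toNat < k → k ≤ path.toList.length → ¬ pvGood (path.toList.take k) := by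
      intro k h1 h2 hg
      have := hmmax k h2 hg
      omega
    have := pv_loop_spec path.toList.length path.toList (le_refl _) m.toNat hmlen hmgood hmx
    rwa [List.take_length] at this
  simp only [get_zipped_path, get_zipped_path_alt, hc, hm, hloop]
  have hsl : (PySem.Str.slice path none (some m)).toList = List.take m.toNat path.toList := by
    rw [PySem.Str.toList_slice, PySem.Chars.slice_eq_listSlice, PySem.List.slice_to _ hm0]
  rw [← hsl, String.ofList_toList]
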